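-- pv_equiv track=rewrite | github.com/k08200/nightbot | src/nightbot/escalation.py | classify_escalation
-- ===== SOURCE A (Python) =====
-- from enum import IntEnum
--
-- class Level(IntEnum):
--     SILENT = 0   # log only
--     REPORT = 1   # file only
--     NOTIFY = 2   # slack DM
--     URGENT = 3   # phone call
--
-- def classify_escalation(scout_report: str, escalation_reason: str = "") -> Level:
--     """Decide escalation level based on scout result."""
--
--     lower = (scout_report + escalation_reason).lower()
--
--     # Urgent: everything is blocked
--     if "all tasks blocked" in lower or "pipeline halt" in lower:
--         return Level.URGENT
--
--     # Notify: decision needed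
--     if any(kw in lower for kw in ["escalate", "decision needed", "trade-off", "tradeoff", "which approach"]):
--         return Level.NOTIFY
--
--     # Report: normal completion
--     if any(kw in lower for kw in ["done", "completed", "conclusion"]):
--         return Level.REPORT
--
--     return Level.SILENT
-- ===== SOURCE B (Python) =====
-- from enum import IntEnum
--
-- class Level(IntEnum):
--     SILENT = 0   # log only
--     REPORT = 1   # file only
--     NOTIFY = 2   # slack DM
--     URGENT = 3   # phone call
--
-- _KEYWORD_TABLE = [
--     ("all tasks blocked", Level.URGENT),
--     ("pipeline halt", Level.URGENT),
--     ("escalate", Level.NOTIFY),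
--     ("decision needed", Level.NOTIFY),
--     ("trade-off", Level.NOTIFY),
--     ("tradeoff", Level.NOTIFY),
--     ("which approach", Level.NOTIFY),
--     ("done", Level.REPORT),
--     ("completed", Level.REPORT),
--     ("conclusion", Level.REPORT),
-- ]
--
-- def classify_escalation(scout_report: str, escalation_reason: str = "") -> Level:
--     """Decide escalation level: running max over one flat keyword table."""
--     lower = (scout_report + escalation_reason).lower()
--     result = Level.SILENT
--     for kw, lvl in _KEYWORD_TABLE:
--         if kw in lower:
--             result = max(result, lvl)
--     return result
-- ===== Notes on version B (the rewrite author's own statement) =====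
-- stated objective: simpler
-- what changed: Replaced the three-tier short-circuit if/any cascade with a single flat keyword->Level table and one running-max pass over it.
import Mathlib
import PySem

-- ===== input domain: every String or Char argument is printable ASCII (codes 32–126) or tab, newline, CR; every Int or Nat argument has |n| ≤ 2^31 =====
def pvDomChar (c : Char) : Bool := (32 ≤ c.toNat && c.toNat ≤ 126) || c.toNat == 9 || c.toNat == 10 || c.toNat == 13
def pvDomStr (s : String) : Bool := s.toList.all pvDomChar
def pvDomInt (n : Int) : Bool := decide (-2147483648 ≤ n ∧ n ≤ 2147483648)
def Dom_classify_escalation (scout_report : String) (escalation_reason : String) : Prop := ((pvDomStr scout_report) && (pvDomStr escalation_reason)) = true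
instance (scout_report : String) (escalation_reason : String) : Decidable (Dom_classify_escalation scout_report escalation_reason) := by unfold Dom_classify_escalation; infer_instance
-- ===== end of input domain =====

-- B replaces A's three-tier short-circuit cascade with one running-max pass over a flat
-- keyword→level table (objective: simpler decomposition, same cost).

-- ===== PORT A =====
-- A's short-circuit cascade: URGENT, then NOTIFY via any(...), then REPORT via any(...), else SILENT.
def classify_escalation (scout_report : String) (escalation_reason : String) : Int :=
  let lower := PySem.Chars.lower (scout_report.toList ++ escalation_reason.toList)
  if PySem.Chars.isIn "all tasks blocked".toList lower || PySem.Chars.isIn "pipeline halt".toList lower then 3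
  else if ["escalate", "decision needed", "trade-off", "tradeoff", "which approach"].any
      (fun kw => PySem.Chars.isIn kw.toList lower) then 2
  else if ["done", "completed", "conclusion"].any
      (fun kw => PySem.Chars.isIn kw.toList lower) then 1
  else 0

-- ===== PORT B =====
-- B's flat keyword → level table (_KEYWORD_TABLE in Source B).
def escKeywordTable : List (String × Int) :=
  [("all tasks blocked", 3), ("pipeline halt", 3),
   ("escalate", 2), ("decision needed", 2), ("trade-off", 2), ("tradeoff", 2), ("which approach", 2),
   ("done", 1), ("completed", 1), ("conclusion", 1)]

def classify_escalation_alt (scout_report : String) (escalation_reason : String) : Int :=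
  let lower := PySem.Chars.lower (scout_report.toList ++ escalation_reason.toList)
  escKeywordTable.foldl
    (fun result p => if PySem.Chars.isIn p.1.toList lower then max result p.2 else result) 0

-- ===== PRECONDITION & SPEC =====
def Spec_classify_escalation (scout_report : String) (escalation_reason : String) (out : Int) : Prop := out = classify_escalation_alt scout_report escalation_reason
instance (scout_report : String) (escalation_reason : String) (out : Int) : Decidable (Spec_classify_escalation scout_report escalation_reason out) := by unfold Spec_classify_escalation; infer_instance

-- ===== CLAIM (what is proved, stated in full; the proofs are below) =====
def Claim_equal_classify_escalation : Prop := ∀ (scout_report : String) (escalation_reason : String), Dom_classify_escalation scout_report escalation_reason → Spec_classify_escalation scout_report escalation_reason (classify_escalation scout_report escalation_reason)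

-- ===== LEMMAS AND PROOFS =====

-- ===== VERDICT (by name: the statement is the Claim_ definition above) =====
theorem classify_escalation_spec : Claim_equal_classify_escalation := by
  intro s r _
  unfold Spec_classify_escalation classify_escalation classify_escalation_alt escKeywordTable
  simp only [List.any, List.foldl, Bool.or_eq_true]
  generalize PySem.Chars.lower (s.toList ++ r.toList) = L
  generalize PySem.Chars.isIn "all tasks blocked".toList L = b1
  generalize PySem.Chars.isIn "pipeline halt".toList L = b2
  generalize PySem.Chars.isIn "escalate".toList L = b3
  generalize PySem.Chars.isIn "decision needed".toList L = b4
  generalize PySem.Chars.isIn "trade-off".toList L = b5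
  generalize PySem.Chars.isIn "tradeoff".toList L = b6
  generalize PySem.Chars.isIn "which approach".toList L = b7
  generalize PySem.Chars.isIn "done".toList L = b8
  generalize PySem.Chars.isIn "completed".toList L = b9
  generalize PySem.Chars.isIn "conclusion".toList L = b10
  cases b1 <;> cases b2 <;> cases b3 <;> cases b4 <;> cases b5 <;> cases b6 <;>
    cases b7 <;> cases b8 <;> cases b9 <;> cases b10 <;> rfl
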